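-- pv_equiv track=rewrite | github.com/hellosandeeptiwari/NL2Q-Analyst-V2 | backend/tools/auto_discovery_schema.py | _determine_metric_grain
-- ===== SOURCE A (Python) =====
-- from typing import Dict, List, Optional, Any, Tuple
--
-- def _determine_metric_grain(table_columns: List[Dict[str, Any]]) -> str:
--     """Determine the natural grain of metrics from this table"""
--
--     column_names = [col['column_name'].lower() for col in table_columns]
--
--     if any('patient' in col for col in column_names):
--         return 'Patient-level'
--     elif any('hcp' in col or 'provider' in col for col in column_names):
--         return 'HCP-level'
--     elif any('product' in col or 'brand' in col for col in column_names):
--         return 'Product-level'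
--     else:
--         return 'Transaction-level'
-- ===== SOURCE B (Python) =====
-- from typing import Dict, List, Any
--
-- _GRAIN_KEYWORDS = [('patient', 0), ('hcp', 1), ('provider', 1), ('product', 2), ('brand', 2)]
-- _GRAIN_LABELS = ['Patient-level', 'HCP-level', 'Product-level', 'Transaction-level']
--
-- def _determine_metric_grain(table_columns: List[Dict[str, Any]]) -> str:
--     """Determine the natural grain of metrics from this table"""
--     column_names = [col['column_name'].lower() for col in table_columns]
--     best = 3
--     for name in column_names:
--         for keyword, rank in _GRAIN_KEYWORDS:
--             if rank < best and keyword in name: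
--                 best = rank
--     return _GRAIN_LABELS[best]
-- ===== Notes on version B (the rewrite author's own statement) =====
-- stated objective: alternative
-- what changed: Replaces the chained any()-passes with hardcoded branches by a data-driven keyword table: one pass computes the minimum rank of any matched keyword and the label is looked up in a table by that rank.
import Mathlib
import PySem

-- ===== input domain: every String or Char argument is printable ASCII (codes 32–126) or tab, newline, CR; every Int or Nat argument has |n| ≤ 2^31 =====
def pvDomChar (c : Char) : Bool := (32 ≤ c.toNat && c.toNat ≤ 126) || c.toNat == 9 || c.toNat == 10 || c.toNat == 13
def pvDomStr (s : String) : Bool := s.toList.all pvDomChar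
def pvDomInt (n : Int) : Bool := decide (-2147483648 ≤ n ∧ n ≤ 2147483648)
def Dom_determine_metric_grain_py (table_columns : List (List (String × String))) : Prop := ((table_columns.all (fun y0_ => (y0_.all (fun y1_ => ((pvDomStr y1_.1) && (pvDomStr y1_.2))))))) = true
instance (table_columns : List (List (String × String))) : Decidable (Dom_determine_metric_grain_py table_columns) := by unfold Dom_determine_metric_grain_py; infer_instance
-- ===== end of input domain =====

-- B replaces A's hardcoded chain of any()-passes by a keyword-rank table: one pass computes the minimum matched rank and the label is looked up by that rank (alternative decomposition, same cost).

-- ===== PORT A =====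
-- col['column_name'] : first-match dict lookup; the getD "" default is never used under Pre_ (Python raises KeyError there)
def determine_metric_grain_py (table_columns : List (List (String × String))) : String :=
  let column_names := table_columns.map (fun col => PySem.Str.lower (((PySem.Dict.mk col).get? "column_name").getD ""))
  if column_names.any (fun c => PySem.Str.isIn "patient" c) then "Patient-level"
  else if column_names.any (fun c => PySem.Str.isIn "hcp" c || PySem.Str.isIn "provider" c) then "HCP-level"
  else if column_names.any (fun c => PySem.Str.isIn "product" c || PySem.Str.isIn "brand" c) then "Product-level"
  else "Transaction-level"

-- ===== PORT B =====
def grainKeywords : List (String × Nat) :=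
  [("patient", 0), ("hcp", 1), ("provider", 1), ("product", 2), ("brand", 2)]

def grainLabels : List String :=
  ["Patient-level", "HCP-level", "Product-level", "Transaction-level"]

-- B's inner loop over the keyword table for one column name
def bestStep (best : Nat) (name : String) : Nat :=
  grainKeywords.foldl (fun b p => if decide (p.2 < b) && PySem.Str.isIn p.1 name then p.2 else b) best

def determine_metric_grain_py_alt (table_columns : List (List (String × String))) : String :=
  let column_names := table_columns.map (fun col => PySem.Str.lower (((PySem.Dict.mk col).get? "column_name").getD ""))
  let best := column_names.foldl bestStep 3
  -- _GRAIN_LABELS[best]: best is always < 4, so the default is never used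
  grainLabels.getD best "Transaction-level"

-- ===== PRECONDITION & SPEC =====
-- Pre_ excludes exactly the inputs where some column dict lacks the 'column_name' key, on which the Python A raises KeyError.
def Pre_determine_metric_grain_py (table_columns : List (List (String × String))) : Prop :=
  (table_columns.all (fun col => ((PySem.Dict.mk col).get? "column_name").isSome)) = true
instance (table_columns : List (List (String × String))) : Decidable (Pre_determine_metric_grain_py table_columns) := by unfold Pre_determine_metric_grain_py; infer_instance

def pvWitness_determine_metric_grain_py : (List (List (String × String))) :=
  [[("column_name", "Patient_ID")], [("column_name", "hcp_name")]]

def Spec_determine_metric_grain_py (table_columns : List (List (String × String))) (out : String) : Prop := out = determine_metric_grain_py_alt table_columns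
instance (table_columns : List (List (String × String))) (out : String) : Decidable (Spec_determine_metric_grain_py table_columns out) := by unfold Spec_determine_metric_grain_py; infer_instance

-- ===== CLAIM (what is proved, stated in full; the proofs are below) =====
def Claim_equal_determine_metric_grain_py : Prop := ∀ (table_columns : List (List (String × String))), Dom_determine_metric_grain_py table_columns → Pre_determine_metric_grain_py table_columns → Spec_determine_metric_grain_py table_columns (determine_metric_grain_py table_columns)

-- ===== LEMMAS AND PROOFS =====

-- the rank of a single name: 0/1/2/3 by the same priority as A's chain
def rankOf (name : String) : Nat :=
  if PySem.Str.isIn "patient" name then 0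
  else if PySem.Str.isIn "hcp" name || PySem.Str.isIn "provider" name then 1
  else if PySem.Str.isIn "product" name || PySem.Str.isIn "brand" name then 2
  else 3

-- generic boolean form of one bestStep (inner keyword loop), proved by exhaustive cases
theorem bestStep_gen (b : Nat) (hb : b ≤ 3) (p1 p2 p3 p4 p5 : Bool) :
    (if (decide (2 < (if (decide (2 < (if (decide (1 < (if (decide (1 < (if (decide (0 < b) && p1) = true then 0 else b)) && p2) = true then 1 else (if (decide (0 < b) && p1) = true then 0 else b))) && p3) = true then 1 else (if (decide (1 < (if (decide (0 < b) && p1) = true then 0 else b)) && p2) = true then 1 else (if (decide (0 < b) && p1) = true then 0 else b)))) && p4) = true then 2 else (if (decide (1 < (if (decide (1 < (if (decide (0 < b) && p1) = true then 0 else b)) && p2) = true then 1 else (if (decide (0 < b) && p1) = true then 0 else b))) && p3) = true then 1 else (if (decide (1 < (if (decide (0 < b) && p1) = true then 0 else b)) && p2) = true then 1 else (if (decide (0 < b) && p1) = true then 0 else b))))) && p5) = true then 2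
     else (if (decide (2 < (if (decide (1 < (if (decide (1 < (if (decide (0 < b) && p1) = true then 0 else b)) && p2) = true then 1 else (if (decide (0 < b) && p1) = true then 0 else b))) && p3) = true then 1 else (if (decide (1 < (if (decide (0 < b) && p1) = true then 0 else b)) && p2) = true then 1 else (if (decide (0 < b) && p1) = true then 0 else b)))) && p4) = true then 2 else (if (decide (1 < (if (decide (1 < (if (decide (0 < b) && p1) = true then 0 else b)) && p2) = true then 1 else (if (decide (0 < b) && p1) = true then 0 else b))) && p3) = true then 1 else (if (decide (1 < (if (decide (0 < b) && p1) = true then 0 else b)) && p2) = true then 1 else (if (decide (0 < b) && p1) = true then 0 else b))))) =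
    min b (if p1 = true then 0 else if (p2 || p3) = true then 1 else if (p4 || p5) = true then 2 else 3) := by
  cases p1 <;> cases p2 <;> cases p3 <;> cases p4 <;> cases p5 <;>
    simp <;> first | omega | (split_ifs <;> omega)

theorem bestStep_eq (b : Nat) (hb : b ≤ 3) (n : String) : bestStep b n = min b (rankOf n) := by
  simp only [bestStep, grainKeywords, List.foldl, rankOf]
  exact bestStep_gen b hb _ _ _ _ _

-- the minimum rank over a list of names
def minRank (names : List String) : Nat :=
  if names.any (fun c => PySem.Str.isIn "patient" c) then 0
  else if names.any (fun c => PySem.Str.isIn "hcp" c || PySem.Str.isIn "provider" c) then 1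
  else if names.any (fun c => PySem.Str.isIn "product" c || PySem.Str.isIn "brand" c) then 2
  else 3

-- generic boolean form of peeling one name off minRank
theorem minRank_cons_gen (p1 p2 p3 q1 q2 q3 : Bool) :
    (if (p1 || q1) = true then (0 : Nat)
     else if (p2 || q2) = true then 1
     else if (p3 || q3) = true then 2 else 3) =
    min (if p1 = true then 0 else if p2 = true then 1 else if p3 = true then 2 else 3)
        (if q1 = true then 0 else if q2 = true then 1 else if q3 = true then 2 else 3) := by
  cases p1 <;> cases p2 <;> cases p3 <;> cases q1 <;> cases q2 <;> cases q3 <;> simp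

theorem minRank_cons (n : String) (ns : List String) :
    minRank (n :: ns) = min (rankOf n) (minRank ns) := by
  simp only [minRank, rankOf, List.any_cons]
  exact minRank_cons_gen _ _ _ _ _ _

theorem minRank_le (names : List String) : minRank names ≤ 3 := by
  simp only [minRank]; split_ifs <;> omega

theorem foldl_bestStep (names : List String) (b : Nat) (hb : b ≤ 3) :
    names.foldl bestStep b = min b (minRank names) := by
  induction names generalizing b with
  | nil => simp [minRank]; omega
  | cons n ns ih =>
      have hr : rankOf n ≤ 3 := by simp only [rankOf]; split_ifs <;> omega
      rw [List.foldl_cons, bestStep_eq b hb, ih (min b (rankOf n)) (by omega), minRank_cons]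
      omega

-- indexing the label table by the minimum rank is exactly A's priority chain
theorem label_of_minRank (names : List String) :
    grainLabels.getD (minRank names) "Transaction-level" =
      (if names.any (fun c => PySem.Str.isIn "patient" c) then "Patient-level"
       else if names.any (fun c => PySem.Str.isIn "hcp" c || PySem.Str.isIn "provider" c) then "HCP-level"
       else if names.any (fun c => PySem.Str.isIn "product" c || PySem.Str.isIn "brand" c) then "Product-level"
       else "Transaction-level") := by
  unfold minRank
  split_ifs <;> rfl

-- ===== VERDICT (by name: the statement is the Claim_ definition above) =====
theorem determine_metric_grain_py_spec : Claim_equal_determine_metric_grain_py := by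
  intro tc _ _
  show determine_metric_grain_py tc = determine_metric_grain_py_alt tc
  simp only [determine_metric_grain_py, determine_metric_grain_py_alt]
  rw [foldl_bestStep _ 3 (by omega), Nat.min_eq_right (minRank_le _), label_of_minRank]
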